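-- pv_equiv track=rewrite | github.com/lsh23/algorithm-exercise | 그리디/카드_합체_놀이.py | solve
-- ===== SOURCE A (Python) =====
-- from typing import List
--
-- def solve(n:int, m:int, cards:List[int] ) -> int:
--
--     for _ in range(m):
--         cards.sort()
--         card_1 = cards[0]
--         card_2 = cards[1]
--         card_sum = card_1 + card_2
--         cards[0] = card_sum
--         cards[1] = card_sum
--
--     return sum(cards)
-- ===== SOURCE B (Python) =====
-- # B: sort once, then keep the list sorted by linearly inserting the merged
-- # sum twice each round (no re-sort per round). Return-value equivalence only:
-- # A sorts/overwrites `cards` in place, B never mutates its argument.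
-- def solve(n, m, cards):
--     xs = sorted(cards)
--     for _ in range(m):
--         s = xs[0] + xs[1]
--         rest = xs[2:]
--         i = 0
--         while i < len(rest) and rest[i] <= s:
--             i += 1
--         xs = rest[:i] + [s, s] + rest[i:]
--     return sum(xs)
-- ===== Notes on version B (the rewrite author's own statement) =====
-- stated objective: alternative
-- what changed: Instead of re-sorting the whole list on every round, B sorts once and then keeps the list sorted by removing the two smallest and linearly inserting the merged sum twice per round.
import Mathlib
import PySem

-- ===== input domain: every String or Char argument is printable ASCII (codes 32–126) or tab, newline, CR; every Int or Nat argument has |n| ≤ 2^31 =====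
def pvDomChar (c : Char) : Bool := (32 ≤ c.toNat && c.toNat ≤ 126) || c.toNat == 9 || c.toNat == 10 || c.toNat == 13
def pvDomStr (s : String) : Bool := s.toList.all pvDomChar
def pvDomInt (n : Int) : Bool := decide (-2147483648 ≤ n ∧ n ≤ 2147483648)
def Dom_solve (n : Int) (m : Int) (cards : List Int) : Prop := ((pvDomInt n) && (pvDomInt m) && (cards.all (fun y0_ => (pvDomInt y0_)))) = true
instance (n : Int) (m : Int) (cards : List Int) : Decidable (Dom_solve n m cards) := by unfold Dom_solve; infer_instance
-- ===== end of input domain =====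

-- B keeps the list sorted and linearly inserts the merged sum twice per round
-- instead of re-sorting the whole list every round (objective: alternative).
-- Return-value equivalence only: Python A mutates `cards` in place, B does not.

-- ===== PORT A =====
-- one iteration of A's loop body: cards.sort(); s = cards[0]+cards[1]; cards[0]=s; cards[1]=s
def solveStepA (cs : List Int) : List Int :=
  let t := PySem.List.sorted cs (fun x => x) false
  let c1 := PySem.List.pyGetD t (0 : Int) 0
  let c2 := PySem.List.pyGetD t (1 : Int) 0
  PySem.List.pySetD (PySem.List.pySetD t (0 : Int) (c1 + c2)) (1 : Int) (c1 + c2)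

def solve (n : Int) (m : Int) (cards : List Int) : Int :=
  ((List.range m.toNat).foldl (fun cs _ => solveStepA cs) cards).sum

-- ===== PORT B =====
-- Source B's while loop: first insertion position i with rest[i] > s (scanning left to right)
def insIdx : List Int → Int → Nat
  | [], _ => 0
  | x :: t, v => if x ≤ v then insIdx t v + 1 else 0

-- one iteration of B's loop: s = xs[0]+xs[1]; rest = xs[2:]; xs = rest[:i] + [s,s] + rest[i:]
def solveStepB (xs : List Int) : List Int :=
  let s := PySem.List.pyGetD xs (0 : Int) 0 + PySem.List.pyGetD xs (1 : Int) 0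
  let rest := PySem.List.slice xs (some 2) none
  let i := insIdx rest s
  PySem.List.slice rest none (some (i : Int)) ++ [s, s] ++ PySem.List.slice rest (some (i : Int)) none

def solve_alt (n : Int) (m : Int) (cards : List Int) : Int :=
  ((List.range m.toNat).foldl (fun xs _ => solveStepB xs) (PySem.List.sorted cards (fun x => x) false)).sum

-- ===== PRECONDITION & SPEC =====
-- A raises IndexError (cards[0] / cards[1]) when the loop runs at least once on fewer than 2 cards.
def Pre_solve (n : Int) (m : Int) (cards : List Int) : Prop := m ≤ 0 ∨ 2 ≤ cards.length
instance (n : Int) (m : Int) (cards : List Int) : Decidable (Pre_solve n m cards) := by unfold Pre_solve; infer_instance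
def pvWitness_solve : Int × Int × List Int := (4, 2, [3, 1, 2, 4])

def Spec_solve (n : Int) (m : Int) (cards : List Int) (out : Int) : Prop := out = solve_alt n m cards
instance (n : Int) (m : Int) (cards : List Int) (out : Int) : Decidable (Spec_solve n m cards out) := by unfold Spec_solve; infer_instance

-- ===== CLAIM (what is proved, stated in full; the proofs are below) =====
def Claim_equal_solve : Prop := ∀ (n : Int) (m : Int) (cards : List Int), Dom_solve n m cards → Pre_solve n m cards → Spec_solve n m cards (solve n m cards)

-- ===== LEMMAS AND PROOFS =====

lemma insIdx_take_le (r : List Int) (s : Int) : ∀ x ∈ r.take (insIdx r s), x ≤ s := by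
  induction r with
  | nil => simp
  | cons x t ih =>
    simp only [insIdx]
    split
    · next h =>
      intro y hy
      rcases List.mem_cons.mp (by simpa using hy) with h1 | h1
      · exact h1 ▸ h
      · exact ih y h1
    · simp

lemma insIdx_drop_ge (r : List Int) (s : Int) (hr : r.Pairwise (· ≤ ·)) :
    ∀ x ∈ r.drop (insIdx r s), s ≤ x := by
  induction r with
  | nil => simp
  | cons x t ih =>
    simp only [insIdx]
    rcases List.pairwise_cons.mp hr with ⟨hx, ht⟩
    split
    · next h => exact fun y hy => ih ht y (by simpa using hy)
    · next h =>
      intro y hy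
      rcases List.mem_cons.mp (by simpa using hy) with h1 | h1
      · omega
      · have := hx y h1; omega

lemma perm_ins2 (r : List Int) (s : Int) :
    (r.take (insIdx r s) ++ s :: s :: r.drop (insIdx r s)).Perm (s :: s :: r) := by
  have h1 : (r.take (insIdx r s) ++ s :: s :: r.drop (insIdx r s)).Perm
      (s :: (r.take (insIdx r s) ++ s :: r.drop (insIdx r s))) := List.perm_middle
  have h2 : (r.take (insIdx r s) ++ s :: r.drop (insIdx r s)).Perm (s :: r) := by
    have := List.perm_middle (a := s) (l₁ := r.take (insIdx r s)) (l₂ := r.drop (insIdx r s))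
    rwa [List.take_append_drop] at this
  exact h1.trans (h2.cons s)

lemma pairwise_ins2 (r : List Int) (s : Int) (hr : r.Pairwise (· ≤ ·)) :
    (r.take (insIdx r s) ++ s :: s :: r.drop (insIdx r s)).Pairwise (· ≤ ·) := by
  have htk := insIdx_take_le r s
  have hdp := insIdx_drop_ge r s hr
  rw [List.pairwise_append]
  refine ⟨hr.sublist (List.take_sublist _ _), ?_, ?_⟩
  · rw [List.pairwise_cons]
    refine ⟨?_, by rw [List.pairwise_cons]; exact ⟨hdp, hr.sublist (List.drop_sublist _ _)⟩⟩
    intro y hy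
    rcases List.mem_cons.mp hy with h | h
    · omega
    · exact hdp y h
  · intro x hx y hy
    have h1 := htk x hx
    rcases List.mem_cons.mp hy with h | h
    · omega
    · rcases List.mem_cons.mp h with h | h
      · omega
      · have := hdp y h; omega

-- the central fact: sorting s::s::r (r sorted) = B's double linear insertion
lemma sorted_ins2 (r : List Int) (s : Int) (hr : r.Pairwise (· ≤ ·)) :
    PySem.List.sorted (s :: s :: r) (fun x => x) false =
      r.take (insIdx r s) ++ s :: s :: r.drop (insIdx r s) :=
  PySem.List.sorted_id_eq_of_perm_of_pairwise _ _ (perm_ins2 r s) (pairwise_ins2 r s hr)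

lemma stepB_def (a b : Int) (r : List Int) :
    solveStepB (a :: b :: r) =
      r.take (insIdx r (a + b)) ++ (a + b) :: (a + b) :: r.drop (insIdx r (a + b)) := by
  simp [solveStepB, pysem]

lemma stepA_def (cs : List Int) (a b : Int) (r : List Int)
    (h : PySem.List.sorted cs (fun x => x) false = a :: b :: r) :
    solveStepA cs = (a + b) :: (a + b) :: r := by
  simp [solveStepA, h, pysem]

-- one round: sorting A's new state equals B's step applied to the sorted old state
lemma step_comm (cs : List Int) (h : 2 ≤ cs.length) :
    PySem.List.sorted (solveStepA cs) (fun x => x) false =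
      solveStepB (PySem.List.sorted cs (fun x => x) false) := by
  obtain ⟨a, b, r, ht⟩ : ∃ a b r, PySem.List.sorted cs (fun x => x) false = a :: b :: r := by
    have hl : 2 ≤ (PySem.List.sorted cs (fun x => x) false).length := by
      rw [(PySem.List.sorted_perm cs (fun x => x) false).length_eq]; exact h
    match hh : PySem.List.sorted cs (fun x => x) false with
    | a :: b :: r => exact ⟨a, b, r, rfl⟩
    | [] => rw [hh] at hl; simp at hl
    | [a] => rw [hh] at hl; simp at hl
  have hr : r.Pairwise (· ≤ ·) := by
    have := PySem.List.sorted_pairwise cs (fun x => x)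
    rw [ht] at this
    exact (List.pairwise_cons.mp (List.pairwise_cons.mp this).2).2
  rw [stepA_def cs a b r ht, ht, stepB_def, sorted_ins2 r (a + b) hr]

lemma stepA_length (cs : List Int) : (solveStepA cs).length = cs.length := by
  simp [solveStepA, PySem.List.length_pySetD,
        (PySem.List.sorted_perm cs (fun x => x) false).length_eq]

-- loop invariant: B's state is the sorted image of A's state, lengths preserved
lemma loop_inv (k : Nat) (cs : List Int) (h : 2 ≤ cs.length) :
    PySem.List.sorted ((List.range k).foldl (fun c _ => solveStepA c) cs) (fun x => x) false =
      (List.range k).foldl (fun x _ => solveStepB x) (PySem.List.sorted cs (fun x => x) false) ∧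
    ((List.range k).foldl (fun c _ => solveStepA c) cs).length = cs.length := by
  induction k with
  | zero => simp
  | succ k ih =>
    rw [List.range_succ, List.foldl_append, List.foldl_append]
    obtain ⟨ih1, ih2⟩ := ih
    simp only [List.foldl_cons, List.foldl_nil]
    constructor
    · rw [step_comm _ (by omega), ih1]
    · rw [stepA_length]; exact ih2

-- ===== VERDICT (by name: the statement is the Claim_ definition above) =====
theorem solve_spec : Claim_equal_solve := by
  intro n m cards _ hpre
  unfold Spec_solve solve solve_alt
  rcases hpre with hm | hlen
  · have : m.toNat = 0 := by omega
    rw [this]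
    simpa using ((PySem.List.sorted_perm cards (fun x => x) false).sum_eq).symm
  · have h := (loop_inv m.toNat cards hlen).1
    calc ((List.range m.toNat).foldl (fun c _ => solveStepA c) cards).sum
        = (PySem.List.sorted ((List.range m.toNat).foldl (fun c _ => solveStepA c) cards)
            (fun x => x) false).sum := ((PySem.List.sorted_perm _ _ _).sum_eq).symm
      _ = _ := by rw [h]
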